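-- pv_equiv track=rewrite | github.com/yokoszn/CreatureGRC | scripts/cloud_collectors.py | _classify_data
-- ===== SOURCE A (Python) =====
-- from typing import List, Dict, Optional
--
-- def _classify_data(tables: List[str]) -> str:
--     """Classify data based on table names."""
--     sensitive_indicators = {
--         "pii": ["users", "customers", "profiles", "contacts", "employees"],
--         "phi": ["patients", "medical", "health", "prescriptions"],
--         "pci": ["payments", "cards", "transactions", "billing"],
--         "financial": ["accounts", "invoices", "revenue", "payroll"]
--     }
--
--     for classification, keywords in sensitive_indicators.items():
--         if any(keyword in table.lower() for table in tables for keyword in keywords):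
--             return classification.upper()
--
--     return "UNKNOWN"
-- ===== SOURCE B (Python) =====
-- def _classify_data(tables):
--     """Classify data based on table names."""
--     sensitive_indicators = {
--         "pii": ["users", "customers", "profiles", "contacts", "employees"],
--         "phi": ["patients", "medical", "health", "prescriptions"],
--         "pci": ["payments", "cards", "transactions", "billing"],
--         "financial": ["accounts", "invoices", "revenue", "payroll"]
--     }
--
--     # pass 1: collect every classification matched by some table
--     matched = set()
--     for table in tables:
--         t = table.lower()
--         for classification, keywords in sensitive_indicators.items():
--             if any(k in t for k in keywords):
--                 matched.add(classification)
--
--     # pass 2: resolve by declared priority order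
--     for classification in sensitive_indicators:
--         if classification in matched:
--             return classification.upper()
--     return "UNKNOWN"
-- ===== Notes on version B (the rewrite author's own statement) =====
-- stated objective: alternative
-- what changed: B splits the work into two passes: one pass over the tables builds the set of all matched classifications (lowercasing each table once), then a separate pass over the fixed key order picks the first matched key; A instead short-circuits with a priority-outer loop that rescans all tables per classification.
import Mathlib
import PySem

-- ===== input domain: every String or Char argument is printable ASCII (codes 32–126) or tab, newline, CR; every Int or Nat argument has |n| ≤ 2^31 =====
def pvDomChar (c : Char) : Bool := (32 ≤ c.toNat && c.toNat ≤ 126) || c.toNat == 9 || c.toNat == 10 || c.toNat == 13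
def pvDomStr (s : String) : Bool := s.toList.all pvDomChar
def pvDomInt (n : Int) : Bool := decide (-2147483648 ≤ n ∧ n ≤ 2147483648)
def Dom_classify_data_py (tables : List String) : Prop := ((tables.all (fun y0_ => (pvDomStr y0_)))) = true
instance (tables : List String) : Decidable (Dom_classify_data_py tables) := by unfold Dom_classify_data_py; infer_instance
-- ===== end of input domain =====

-- B is an alternative decomposition of A (collect all matches in one pass over the tables,
-- then resolve by priority in a second pass); same cost, no speed claim.

-- shared literal data: the sensitive_indicators dict, in insertion order
def pvIndicators : List (String × List String) :=
  [("pii", ["users", "customers", "profiles", "contacts", "employees"]),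
   ("phi", ["patients", "medical", "health", "prescriptions"]),
   ("pci", ["payments", "cards", "transactions", "billing"]),
   ("financial", ["accounts", "invoices", "revenue", "payroll"])]

-- ===== PORT A =====
-- A: for each (classification, keywords) in order, scan all tables; return on first hit.
def classifyLoopA (items : List (String × List String)) (tables : List String) : String :=
  match items with
  | [] => "UNKNOWN"
  | (classification, keywords) :: rest =>
      if tables.any (fun table => keywords.any (fun keyword => PySem.Str.isIn keyword (PySem.Str.lower table))) then
        PySem.Str.upper classification
      else
        classifyLoopA rest tables

def classify_data_py (tables : List String) : String :=
  classifyLoopA pvIndicators tables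

-- ===== PORT B =====
-- B pass 1: one fold over the tables, building the set of all matched classifications.
def pvMatched (tables : List String) : PySem.Set String :=
  tables.foldl
    (fun matched table =>
      let t := PySem.Str.lower table
      pvIndicators.foldl
        (fun matched p =>
          if p.2.any (fun k => PySem.Str.isIn k t) then PySem.Set.add matched p.1 else matched)
        matched)
    PySem.Set.empty

-- B pass 2: first classification (in declared order) present in the matched set.
def pvResolve (keys : List String) (matched : PySem.Set String) : String :=
  match keys with
  | [] => "UNKNOWN"
  | classification :: rest =>
      if PySem.Set.contains matched classification then PySem.Str.upper classification
      else pvResolve rest matched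

def classify_data_py_alt (tables : List String) : String :=
  pvResolve (pvIndicators.map Prod.fst) (pvMatched tables)

-- ===== PRECONDITION & SPEC =====
def Spec_classify_data_py (tables : List String) (out : String) : Prop := out = classify_data_py_alt tables
instance (tables : List String) (out : String) : Decidable (Spec_classify_data_py tables out) := by unfold Spec_classify_data_py; infer_instance

-- ===== CLAIM (what is proved, stated in full; the proofs are below) =====
def Claim_equal_classify_data_py : Prop := ∀ (tables : List String), Dom_classify_data_py tables → Spec_classify_data_py tables (classify_data_py tables)

-- ===== LEMMAS AND PROOFS =====

-- does table `t` hit the keyword list `kws`?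
def pvHit (t : String) (kws : List String) : Bool :=
  kws.any (fun k => PySem.Str.isIn k (PySem.Str.lower t))

lemma mem_addIf_foldl {α β : Type} [DecidableEq α] (items : List (α × β)) (cond : α × β → Bool)
    (m : PySem.Set α) (c : α) :
    c ∈ items.foldl (fun matched p => if cond p then PySem.Set.add matched p.1 else matched) m
      ↔ c ∈ m ∨ ∃ p ∈ items, p.1 = c ∧ cond p := by
  induction items generalizing m with
  | nil => simp
  | cons p ps ih =>
      simp only [List.foldl_cons, ih]
      by_cases h : cond p = true <;> simp [h, PySem.Set.mem_add] <;> tauto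

lemma mem_matched (tables : List String) (c : String) :
    c ∈ pvMatched tables ↔ ∃ t ∈ tables, ∃ p ∈ pvIndicators, p.1 = c ∧ pvHit t p.2 := by
  unfold pvMatched
  suffices h : ∀ (m : PySem.Set String),
      c ∈ tables.foldl
            (fun matched table =>
              pvIndicators.foldl
                (fun matched p =>
                  if p.2.any (fun k => PySem.Str.isIn k (PySem.Str.lower table)) then PySem.Set.add matched p.1 else matched)
                matched)
            m
        ↔ c ∈ m ∨ ∃ t ∈ tables, ∃ p ∈ pvIndicators, p.1 = c ∧ pvHit t p.2 by
    simpa [PySem.Set.empty] using h PySem.Set.empty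
  induction tables with
  | nil => simp
  | cons t ts ih =>
      intro m
      simp only [List.foldl_cons, ih,
        mem_addIf_foldl pvIndicators (fun p => p.2.any (fun k => PySem.Str.isIn k (PySem.Str.lower t))) m c]
      constructor
      · rintro ((h | ⟨p, hp, hc, hcond⟩) | ⟨u, hu, hrest⟩)
        · exact Or.inl h
        · exact Or.inr ⟨t, by simp, p, hp, hc, by simpa [pvHit] using hcond⟩
        · exact Or.inr ⟨u, by simp [hu], hrest⟩
      · rintro (h | ⟨u, hu, hp⟩)
        · exact Or.inl (Or.inl h)
        · rcases List.mem_cons.mp hu with rfl | hu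
          · rcases hp with ⟨p, hp, hc, hcond⟩
            exact Or.inl (Or.inr ⟨p, hp, hc, by simpa [pvHit] using hcond⟩)
          · exact Or.inr ⟨u, hu, hp⟩

lemma contains_matched (tables : List String) (c : String) (kws : List String)
    (hmem : (c, kws) ∈ pvIndicators) (huniq : ∀ p ∈ pvIndicators, p.1 = c → p.2 = kws) :
    PySem.Set.contains (pvMatched tables) c = tables.any (fun t => pvHit t kws) := by
  rcases h : tables.any (fun t => pvHit t kws) with _ | _
  · simp only [List.any_eq_false] at h
    rw [Bool.eq_false_iff, Ne, PySem.Set.contains_iff, mem_matched]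
    rintro ⟨t, ht, p, hp, rfl, hhit⟩
    rw [huniq p hp rfl] at hhit
    exact absurd hhit (by simpa using h t ht)
  · rw [List.any_eq_true] at h
    rcases h with ⟨t, ht, hhit⟩
    rw [PySem.Set.contains_iff, mem_matched]
    exact ⟨t, ht, (c, kws), hmem, rfl, by simpa using hhit⟩

-- ===== VERDICT (by name: the statement is the Claim_ definition above) =====
theorem classify_data_py_spec : Claim_equal_classify_data_py := by
  intro tables _
  unfold Spec_classify_data_py classify_data_py classify_data_py_alt
  have h1 := contains_matched tables "pii" ["users", "customers", "profiles", "contacts", "employees"] (by simp [pvIndicators]) (by decide)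
  have h2 := contains_matched tables "phi" ["patients", "medical", "health", "prescriptions"] (by simp [pvIndicators]) (by decide)
  have h3 := contains_matched tables "pci" ["payments", "cards", "transactions", "billing"] (by simp [pvIndicators]) (by decide)
  have h4 := contains_matched tables "financial" ["accounts", "invoices", "revenue", "payroll"] (by simp [pvIndicators]) (by decide)
  simp only [pvIndicators, List.map, pvResolve, classifyLoopA, h1, h2, h3, h4, pvHit]
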